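-- pv_equiv track=rewrite | github.com/sciatti/AoC-2024 | 3/puzzle2/sln.py | is_valid_mul
-- ===== SOURCE A (Python) =====
-- def is_valid_mul(substr):
--     # Every valid multiply call must start and end with a number and have a comma
--     found_comma = False
--     for i, char in enumerate(substr):
--         if i == 0 and not str.isdigit(char):
--             return False
--         elif i == len(substr) - 1 and not str.isdigit(char):
--             return False
--         elif found_comma:
--             if not str.isdigit(char):
--                 return False
--         else:
--             if not (char == ',' or str.isdigit(char)):
--                 return False
--             if char == ",":
--                 found_comma = True
--     return True
-- ===== SOURCE B (Python) =====
-- def is_valid_mul(substr):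
--     # Flat checks instead of A's stateful scan: empty is vacuously valid,
--     # at most one comma, digit endpoints, and every char a digit or comma.
--     if substr == '':
--         return True
--     if substr.count(',') > 1:
--         return False
--     return (str.isdigit(substr[0]) and str.isdigit(substr[-1])
--             and all(c == ',' or str.isdigit(c) for c in substr))
-- ===== Notes on version B (the rewrite author's own statement) =====
-- stated objective: simpler
-- what changed: Replaced A's indexed one-pass state machine (found_comma flag, per-index first/last branches) with flat declarative checks: comma count at most one, digit endpoints, and a single membership scan.
import Mathlib
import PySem

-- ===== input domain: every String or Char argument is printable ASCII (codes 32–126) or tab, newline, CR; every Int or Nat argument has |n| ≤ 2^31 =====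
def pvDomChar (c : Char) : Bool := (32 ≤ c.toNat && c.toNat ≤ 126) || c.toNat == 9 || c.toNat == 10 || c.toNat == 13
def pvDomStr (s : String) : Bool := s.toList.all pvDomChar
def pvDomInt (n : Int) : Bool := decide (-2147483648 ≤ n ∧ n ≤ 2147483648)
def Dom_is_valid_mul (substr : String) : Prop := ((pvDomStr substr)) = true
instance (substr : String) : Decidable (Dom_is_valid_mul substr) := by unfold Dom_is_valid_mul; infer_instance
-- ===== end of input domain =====

-- B replaces A's indexed found_comma state machine with flat checks (comma count, digit endpoints, one membership scan); simpler, same cost.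

-- ===== PORT A =====
-- the enumerate loop of A: i is the current index, n = len(substr), fc = found_comma
def isValidMulLoop : List Char → Nat → Nat → Bool → Bool
  | [], _, _, _ => true
  | c :: rest, i, n, fc =>
    if i == 0 && !(PySem.Chars.isdigit c) then false
    else if i == n - 1 && !(PySem.Chars.isdigit c) then false
    else if fc then
      if !(PySem.Chars.isdigit c) then false
      else isValidMulLoop rest (i + 1) n fc
    else
      if !(c == ',' || PySem.Chars.isdigit c) then false
      else isValidMulLoop rest (i + 1) n (if c == ',' then true else fc)

def is_valid_mul (substr : String) : Bool :=
  isValidMulLoop substr.toList 0 substr.toList.length false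

-- ===== PORT B =====
def is_valid_mul_alt (substr : String) : Bool :=
  if substr.toList = [] then true                  -- substr == '' (on the code points)
  else if 1 < substr.toList.count ',' then false   -- substr.count(',') > 1 (single-char pattern)
  else ((PySem.Str.pyGet? substr 0).map PySem.Chars.isdigit).getD false      -- str.isdigit(substr[0]); some, since nonempty
       && ((PySem.Str.pyGet? substr (-1)).map PySem.Chars.isdigit).getD false  -- str.isdigit(substr[-1])
       && substr.toList.all (fun c => c == ',' || PySem.Chars.isdigit c)

-- ===== PRECONDITION & SPEC =====
def Spec_is_valid_mul (substr : String) (out : Bool) : Prop := out = is_valid_mul_alt substr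
instance (substr : String) (out : Bool) : Decidable (Spec_is_valid_mul substr out) := by unfold Spec_is_valid_mul; infer_instance

-- ===== CLAIM (what is proved, stated in full; the proofs are below) =====
def Claim_equal_is_valid_mul : Prop := ∀ (substr : String), Dom_is_valid_mul substr → Spec_is_valid_mul substr (is_valid_mul substr)

-- ===== LEMMAS AND PROOFS =====

theorem getLast?_cons_ne (c : Char) (rest : List Char) (h : rest ≠ []) :
    (c :: rest).getLast? = rest.getLast? := by
  cases rest with
  | nil => exact absurd rfl h
  | cons x xs => simp [List.getLast?]

theorem isdigit_comma : PySem.Chars.isdigit ',' = false := by decide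

theorem all_comma_or (rest : List Char) (h : ',' ∉ rest) (p : Char → Bool) :
    (rest.all fun c => c == ',' || p c) = rest.all p := by
  induction rest with
  | nil => rfl
  | cons x xs ih =>
    simp only [List.mem_cons, not_or] at h
    have hx : (x == ',') = false := by
      simp; exact fun e => h.1 e.symm
    simp [List.all_cons, hx, ih h.2]

-- characterisation of A's loop from index i ≥ 1 with n = i + rest.length
theorem isValidMulLoop_char (rest : List Char) (i : Nat) (fc : Bool)
    (hi : 1 ≤ i) :
    isValidMulLoop rest i (i + rest.length) fc =
      (rest.all (fun c => (!fc && c == ',') || PySem.Chars.isdigit c)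
       && ((rest.getLast?.map PySem.Chars.isdigit).getD true)
       && decide (rest.count ',' ≤ if fc then 0 else 1)) := by
  induction rest generalizing i fc with
  | nil => simp [isValidMulLoop]
  | cons c rest ih =>
    have hi0 : i ≠ 0 := by omega
    by_cases hlast : rest = []
    · subst hlast
      by_cases hcomma : c = ','
      · subst hcomma
        cases fc <;>
          simp [isValidMulLoop, hi0, isdigit_comma, List.getLast?]
      · by_cases hd : PySem.Chars.isdigit c
        · cases fc <;>
            simp [isValidMulLoop, hd, hcomma, List.getLast?]
        · cases fc <;>
            simp [isValidMulLoop, hi0, hd, List.getLast?, show i + 1 - 1 = i from rfl]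
    · have hne : ¬ (i == i + (rest.length + 1) - 1) = true := by
        simp; have := List.length_pos_iff.mpr hlast; omega
      have hlen : i + (rest.length + 1) = (i + 1) + rest.length := by omega
      have hgl := getLast?_cons_ne c rest hlast
      by_cases hcomma : c = ','
      · subst hcomma
        cases fc <;>
          simp [isValidMulLoop, hi0, hne, isdigit_comma, hlen,
                ih (i+1) _ (by omega), List.count_cons, hgl, hlast]
        by_cases hc0 : List.count ',' rest = 0
        · have hmem : ',' ∉ rest := by
            simpa using List.count_eq_zero.mp hc0
          simp [hc0, all_comma_or rest hmem]
        · simp [hc0]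
      · by_cases hd : PySem.Chars.isdigit c
        · cases fc <;>
            simp [isValidMulLoop, hi0, hne, hd, hcomma, hlen,
                  ih (i+1) _ (by omega), List.count_cons, hgl]
        · cases fc <;> simp [isValidMulLoop, hi0, hne, hd, hcomma]

-- ===== VERDICT (by name: the statement is the Claim_ definition above) =====
theorem is_valid_mul_spec : Claim_equal_is_valid_mul := by
  intro substr _
  unfold Spec_is_valid_mul is_valid_mul is_valid_mul_alt
  cases h : substr.toList with
  | nil => simp [isValidMulLoop]
  | cons c rest =>
    have hget0 : PySem.Str.pyGet? substr 0 = some c := by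
      simp [PySem.Str.pyGet?, PySem.Chars.pyGet?, h]
    rw [if_neg (by simp : ¬ (c :: rest : List Char) = [])]
    by_cases hd : PySem.Chars.isdigit c
    · have hcomma : ¬ c = ',' := by
        intro hh; subst hh; simp [isdigit_comma] at hd
      have hloop : isValidMulLoop (c :: rest) 0 (c :: rest).length false =
          isValidMulLoop rest 1 (1 + rest.length) false := by
        cases rest with
        | nil => simp [isValidMulLoop, hd, hcomma]
        | cons d rs => simp [isValidMulLoop, hd, hcomma, Nat.add_comm]
      rw [hloop, isValidMulLoop_char rest 1 false (le_refl 1)]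
      by_cases hrne : rest = []
      · subst hrne
        simp [hd, hcomma, hget0, List.count_cons,
              PySem.Str.pyGet?, PySem.Chars.pyGet?, h, PySem.List.pyGet?_neg_one,
              List.getLast?, List.getLast_singleton]
      · have hgetm1 : PySem.Str.pyGet? substr (-1) = rest.getLast? := by
          simp [PySem.Str.pyGet?, PySem.Chars.pyGet?, h, PySem.List.pyGet?_neg_one]
          exact getLast?_cons_ne c rest hrne
        obtain ⟨l, hl⟩ : ∃ l, rest.getLast? = some l := by
          clear hgetm1
          cases rest with
          | nil => exact absurd rfl hrne
          | cons x xs =>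
            clear hrne h
            induction xs generalizing x with
            | nil => exact ⟨x, rfl⟩
            | cons y ys ih => simpa [List.getLast?] using ih y
        simp only [List.count_cons, List.all_cons, hget0, hgetm1, hl,
                   Option.map_some, Option.getD_some, hd, hcomma]
        by_cases hcnt : 1 < rest.count ','
        · simp [hcnt, show ¬ rest.count ',' ≤ 1 by omega, hcomma]
        · simp [hcnt, show rest.count ',' ≤ 1 by omega, hd, hcomma,
                Bool.and_comm, Bool.and_left_comm, Bool.and_assoc]
    · -- first char not a digit: A returns false; B's conjunction is false
      have hA : isValidMulLoop (c :: rest) 0 (c :: rest).length false = false := by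
        simp [isValidMulLoop, hd]
      rw [hA]
      by_cases hcnt : 1 < (c :: rest).count ','
      · simp [hcnt]
      · simp [hcnt, h, hd, PySem.List.pyGet?, PySem.List.pyIdx?]
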